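-- pv_equiv track=rewrite | github.com/karan2527/CrackProof | crackproof.py | has_keyboard_runs
-- ===== SOURCE A (Python) =====
-- COMMON_KEYBOARD_RUNS = [
--     "qwertyuiop", "asdfghjkl", "zxcvbnm",
--     "1234567890", "!@#$%^&*()"
-- ]
--
-- def has_keyboard_runs(pw: str, min_len: int = 4) -> bool:
--     low = pw.lower()
--     for run in COMMON_KEYBOARD_RUNS:
--         if any(run[i:i+min_len] in low for i in range(0, len(run)-min_len+1)):
--             return True
--         if any(run[i:i+min_len][::-1] in low for i in range(0, len(run)-min_len+1)):
--             return True
--     return False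
-- ===== SOURCE B (Python) =====
-- COMMON_KEYBOARD_RUNS = [
--     "qwertyuiop", "asdfghjkl", "zxcvbnm",
--     "1234567890", "!@#$%^&*()"
-- ]
--
-- _RUNS_BOTH = [(r, r[::-1]) for r in COMMON_KEYBOARD_RUNS]
--
-- def has_keyboard_runs(pw: str, min_len: int = 4) -> bool:
--     low = pw.lower()
--     for i in range(0, len(low) - min_len + 1):
--         w = low[i:i + min_len]
--         for run, rrun in _RUNS_BOTH:
--             if w in run or w in rrun:
--                 return True
--     return False
-- ===== Notes on version B (the rewrite author's own statement) =====
-- stated objective: alternative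
-- what changed: Traversal is inverted: instead of testing every substring of every keyboard run (and its reverse) for membership in the password, B slides fixed-length windows over the lowered password and tests each window against each run and its precomputed reverse.
import Mathlib
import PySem

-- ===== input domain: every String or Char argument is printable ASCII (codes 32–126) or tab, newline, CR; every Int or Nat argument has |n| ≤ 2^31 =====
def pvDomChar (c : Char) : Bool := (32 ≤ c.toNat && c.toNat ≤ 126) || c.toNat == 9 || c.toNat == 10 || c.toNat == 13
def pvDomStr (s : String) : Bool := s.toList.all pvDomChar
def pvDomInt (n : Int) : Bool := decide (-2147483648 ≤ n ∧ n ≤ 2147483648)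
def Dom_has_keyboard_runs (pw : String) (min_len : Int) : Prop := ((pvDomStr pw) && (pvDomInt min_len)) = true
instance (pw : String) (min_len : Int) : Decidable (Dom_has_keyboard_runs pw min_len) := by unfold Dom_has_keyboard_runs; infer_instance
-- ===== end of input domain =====

-- B replaces A's run-substrings-vs-password scan by sliding password windows against each
-- run and its precomputed reverse (different traversal decomposition; same results).


-- ===== PORT A =====
-- COMMON_KEYBOARD_RUNS (module constant)
def pvRuns : List (List Char) :=
  ["qwertyuiop".toList, "asdfghjkl".toList, "zxcvbnm".toList,
   "1234567890".toList, "!@#$%^&*()".toList]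

-- shared loop helper: lazy `any(P(i) for i in range(a, b))` (short-circuits like
-- Python's generator; fuel = length of the range)
def pvAnyRange : Nat → Int → (Int → Bool) → Bool
  | 0, _, _ => false
  | Nat.succ n, i, P => if P i then true else pvAnyRange n (i + 1) P

def pvAnyFor (a b : Int) (P : Int → Bool) : Bool := pvAnyRange (b - a).toNat a P

-- literal port of A: for each run, any(run[i:i+min_len] in low), then the [::-1] pass
-- (xs[::-1] is List.reverse, exact).
def has_keyboard_runs (pw : String) (min_len : Int) : Bool :=
  let low := PySem.Chars.lower pw.toList
  pvRuns.any (fun run =>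
    (pvAnyFor 0 ((run.length : Int) - min_len + 1) (fun i =>
        PySem.Chars.isIn (PySem.List.slice run (some i) (some (i + min_len))) low))
    ||
    (pvAnyFor 0 ((run.length : Int) - min_len + 1) (fun i =>
        PySem.Chars.isIn (PySem.List.slice run (some i) (some (i + min_len))).reverse low)))

-- ===== PORT B =====
-- _RUNS_BOTH (module constant: each run paired with its reverse, precomputed once)
def pvRunsBoth : List (List Char × List Char) := pvRuns.map (fun r => (r, r.reverse))

-- literal port of B: slide a window over the lowered password, test it against each
-- run and its precomputed reverse.
def has_keyboard_runs_alt (pw : String) (min_len : Int) : Bool :=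
  let low := PySem.Chars.lower pw.toList
  pvAnyFor 0 ((low.length : Int) - min_len + 1) (fun i =>
    let w := PySem.List.slice low (some i) (some (i + min_len))
    pvRunsBoth.any (fun p => PySem.Chars.isIn w p.1 || PySem.Chars.isIn w p.2))

-- ===== PRECONDITION & SPEC =====
def Spec_has_keyboard_runs (pw : String) (min_len : Int) (out : Bool) : Prop := out = has_keyboard_runs_alt pw min_len
instance (pw : String) (min_len : Int) (out : Bool) : Decidable (Spec_has_keyboard_runs pw min_len out) := by unfold Spec_has_keyboard_runs; infer_instance

-- ===== CLAIM (what is proved, stated in full; the proofs are below) =====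
def Claim_equal_has_keyboard_runs : Prop := ∀ (pw : String) (min_len : Int), Dom_has_keyboard_runs pw min_len → Spec_has_keyboard_runs pw min_len (has_keyboard_runs pw min_len)

-- ===== LEMMAS AND PROOFS =====

-- the lazy loop computes exactly `(pyRange a b).any P`
theorem pvAnyRange_eq (P : Int → Bool) : ∀ (n : Nat) (a : Int),
    pvAnyRange n a P = (PySem.List.pyRange a (a + (n : Int))).any P := by
  intro n
  induction n with
  | zero =>
    intro a
    simp only [pvAnyRange, Nat.cast_zero, add_zero]
    symm
    rw [List.any_eq_false]
    intro x hx; rw [PySem.List.mem_pyRange_one] at hx; omega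
  | succ n ih =>
    intro a
    rw [show a + ((n + 1 : Nat) : Int) = (a + 1) + (n : Int) by push_cast; ring]
    rw [PySem.List.pyRange_one_cons (by omega)]
    simp only [pvAnyRange, List.any_cons, ih (a + 1)]
    cases P a <;> simp

theorem pvAnyFor_eq (a b : Int) (P : Int → Bool) :
    pvAnyFor a b P = (PySem.List.pyRange a b).any P := by
  unfold pvAnyFor
  by_cases h : a ≤ b
  · rw [pvAnyRange_eq, Int.toNat_of_nonneg (by omega), add_sub_cancel]
  · simp only [Int.toNat_of_nonpos (by omega : b - a ≤ 0), pvAnyRange]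
    symm
    rw [List.any_eq_false]
    intro x hx; rw [PySem.List.mem_pyRange_one] at hx; omega

-- a slice starting at the list's length is empty (covers every stop, incl. negative)
theorem slice_from_len (s : List Char) (b : Int) :
    PySem.List.slice s (some (s.length : Int)) (some b) = [] := by
  simp [PySem.List.slice, PySem.List.clampIdx]
  split_ifs <;> omega

-- window/slice bridge: the `any` over Python's i-range of length-m windows of s,
-- as an existential over length-m infixes of s
theorem any_win (s : List Char) (m : Nat) (hm : 1 ≤ m) (P : List Char → Bool) :
    ((PySem.List.pyRange 0 ((s.length : Int) - (m : Int) + 1)).any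
        (fun i => P (PySem.List.slice s (some i) (some (i + (m : Int)))))) = true
      ↔ ∃ w : List Char, w.length = m ∧ w <:+: s ∧ P w = true := by
  rw [List.any_eq_true]
  constructor
  · rintro ⟨i, hi, hP⟩
    rw [PySem.List.mem_pyRange_one] at hi
    obtain ⟨hi0, hilt⟩ := hi
    obtain ⟨k, rfl⟩ : ∃ k : Nat, i = (k : Int) := ⟨i.toNat, (Int.toNat_of_nonneg hi0).symm⟩
    have hk : k + m ≤ s.length := by omega
    have hs : PySem.List.slice s (some (k : Int)) (some ((k : Int) + (m : Int)))
        = (s.drop k).take m := by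
      have := PySem.List.slice_natCast s k (k + m)
      push_cast at this
      simpa using this
    refine ⟨(s.drop k).take m, ?_, ?_, by rwa [hs] at hP⟩
    · simp [List.length_take, List.length_drop]; omega
    · exact (List.take_prefix _ _).isInfix.trans (List.drop_suffix _ _).isInfix
  · rintro ⟨w, hlen, hinf, hP⟩
    have : ∃ k, w <+: s.drop k := by
      rw [PySem.Chars.exists_prefix_drop_iff_isIn, PySem.Chars.isIn_iff_infix]
      exact hinf
    obtain ⟨k, hpre⟩ := this
    have hwl : w.length ≤ (s.drop k).length := hpre.length_le
    rw [List.length_drop] at hwl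
    have hk : k + m ≤ s.length := by omega
    have hweq : w = (s.drop k).take m := by
      rw [List.prefix_iff_eq_take] at hpre; rwa [hlen] at hpre
    refine ⟨(k : Int), ?_, ?_⟩
    · rw [PySem.List.mem_pyRange_one]; omega
    · have hs : PySem.List.slice s (some (k : Int)) (some ((k : Int) + (m : Int)))
          = (s.drop k).take m := by
        have := PySem.List.slice_natCast s k (k + m)
        push_cast at this
        simpa using this
      rw [hs, ← hweq]; exact hP

-- both programs, for min_len ≥ 1, decide the same proposition:
-- "some length-min_len word is an infix of the lowered password and of a run or a reversed run"
theorem eq_of_pos (pw : String) (m : Nat) (hm : 1 ≤ m) :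
    has_keyboard_runs pw (m : Int) = has_keyboard_runs_alt pw (m : Int) := by
  unfold has_keyboard_runs has_keyboard_runs_alt
  dsimp only
  simp only [pvAnyFor_eq]
  set low := PySem.Chars.lower pw.toList with hlow
  apply Bool.eq_iff_iff.mpr
  have hB : ∀ w : List Char,
      (pvRunsBoth.any (fun p => PySem.Chars.isIn w p.1 || PySem.Chars.isIn w p.2) = true)
        ↔ ∃ r ∈ pvRuns, (w <:+: r ∨ w <:+: r.reverse) := by
    intro w
    simp [pvRunsBoth, List.any_map, List.any_eq_true, PySem.Chars.isIn_iff_infix]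
  have hBwin := any_win low m hm
    (fun w => pvRunsBoth.any (fun p => PySem.Chars.isIn w p.1 || PySem.Chars.isIn w p.2))
  have hrun : ∀ r : List Char,
      ((((PySem.List.pyRange 0 ((r.length : Int) - (m : Int) + 1)).any (fun i =>
          PySem.Chars.isIn (PySem.List.slice r (some i) (some (i + (m : Int)))) low))
        ||
        ((PySem.List.pyRange 0 ((r.length : Int) - (m : Int) + 1)).any (fun i =>
          PySem.Chars.isIn (PySem.List.slice r (some i) (some (i + (m : Int)))).reverse low))) = true)
      ↔ ∃ w : List Char, w.length = m ∧ w <:+: low ∧ (w <:+: r ∨ w <:+: r.reverse) := by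
    intro r
    rw [Bool.or_eq_true,
      any_win r m hm (fun sub => PySem.Chars.isIn sub low),
      any_win r m hm (fun sub => PySem.Chars.isIn sub.reverse low)]
    constructor
    · rintro (⟨w, hl, hr, hin⟩ | ⟨w, hl, hr, hin⟩)
      · exact ⟨w, hl, (PySem.Chars.isIn_iff_infix _ _).mp hin, Or.inl hr⟩
      · refine ⟨w.reverse, by simpa using hl,
          (PySem.Chars.isIn_iff_infix _ _).mp hin, Or.inr ?_⟩
        rw [← List.reverse_infix]; simpa using hr
    · rintro ⟨w, hl, hlowi, (hr | hr)⟩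
      · exact Or.inl ⟨w, hl, hr, (PySem.Chars.isIn_iff_infix _ _).mpr hlowi⟩
      · refine Or.inr ⟨w.reverse, by simpa using hl, ?_, ?_⟩
        · rw [← List.reverse_infix] at hr; simpa using hr
        · simpa [PySem.Chars.isIn_iff_infix] using hlowi
  constructor
  · intro hA
    rw [List.any_eq_true] at hA
    obtain ⟨r, hrmem, hr⟩ := hA
    obtain ⟨w, hl, hlowi, hor⟩ := (hrun r).mp hr
    exact hBwin.mpr ⟨w, hl, hlowi, (hB w).mpr ⟨r, hrmem, hor⟩⟩
  · intro hBt
    obtain ⟨w, hl, hlowi, hany⟩ := hBwin.mp hBt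
    obtain ⟨r, hrmem, hor⟩ := (hB w).mp hany
    rw [List.any_eq_true]
    exact ⟨r, hrmem, (hrun r).mpr ⟨w, hl, hlowi, hor⟩⟩

-- for min_len ≤ 0 both programs return true (some slice is empty and '' is in everything)
theorem eq_of_nonpos (pw : String) (m : Int) (hm : m ≤ 0) :
    has_keyboard_runs pw m = true ∧ has_keyboard_runs_alt pw m = true := by
  constructor
  · unfold has_keyboard_runs
    simp only [pvAnyFor_eq]
    rw [List.any_eq_true]
    refine ⟨"qwertyuiop".toList, by simp [pvRuns], ?_⟩
    rw [Bool.or_eq_true]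
    left
    rw [List.any_eq_true]
    refine ⟨((("qwertyuiop".toList).length : Int)), ?_, ?_⟩
    · rw [PySem.List.mem_pyRange_one]
      constructor <;> [positivity; omega]
    · rw [slice_from_len]
      exact PySem.Chars.isIn_nil _
  · unfold has_keyboard_runs_alt
    simp only [pvAnyFor_eq]
    rw [List.any_eq_true]
    refine ⟨(((PySem.Chars.lower pw.toList).length : Int)), ?_, ?_⟩
    · rw [PySem.List.mem_pyRange_one]
      constructor <;> [positivity; omega]
    · rw [slice_from_len]
      rw [List.any_eq_true]
      exact ⟨("qwertyuiop".toList, "qwertyuiop".toList.reverse), by simp [pvRunsBoth, pvRuns],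
        by rw [Bool.or_eq_true]; left; exact PySem.Chars.isIn_nil _⟩

-- ===== VERDICT (by name: the statement is the Claim_ definition above) =====
theorem has_keyboard_runs_spec : Claim_equal_has_keyboard_runs := by
  intro pw min_len _
  unfold Spec_has_keyboard_runs
  by_cases hm : min_len ≤ 0
  · obtain ⟨h1, h2⟩ := eq_of_nonpos pw min_len hm
    rw [h1, h2]
  · obtain ⟨m, rfl⟩ : ∃ m : Nat, min_len = (m : Int) :=
      ⟨min_len.toNat, (Int.toNat_of_nonneg (by omega)).symm⟩
    exact eq_of_pos pw m (by omega)
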